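-- pv_equiv track=rewrite | github.com/Tay-Son/GH_CT | algorithm/PRG-Completed/PRG 042891.py | solution
-- ===== SOURCE A (Python) =====
-- from bisect import bisect_right
--
-- def solution(lst_food, k_):
--     lst_food_sorted = sorted(lst_food)
--     lst_food_sum = [0]
--     N_ = len(lst_food)
--     sum_ = 0
--     for food_sorted in lst_food_sorted:
--         sum_ += food_sorted
--         lst_food_sum.append(sum_)
--
--     ptr_s = 0
--     ptr_e = 100000000
--
--     max_ = 0
--     max_tot = 0
--     while ptr_s + 1 < ptr_e:
--         ptr_c = (ptr_s + ptr_e) // 2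
--
--         tot_ = 0
--
--         v_ = bisect_right(lst_food_sorted, ptr_c)
--
--         tot_ = lst_food_sum[v_] + (N_ - v_) * ptr_c
--
--         # for each_food in lst_food:
--         #     tot_ += min(ptr_c, each_food)
--         if tot_ <= k_:
--             if ptr_c > max_:
--                 max_ = ptr_c
--                 max_tot = tot_
--             ptr_s = ptr_c
--         else:
--             ptr_e = ptr_c
--
--     k_ -= max_tot - 1
--     idx = 0
--     cnt_ = 0
--     answer = -1
--     for each_food in lst_food:
--         idx += 1
--         if each_food > max_:
--             cnt_ += 1
--             if cnt_ == k_: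
--                 answer = idx
--                 break
--
--     return answer
-- ===== SOURCE B (Python) =====
-- def solution(lst_food, k_):
--     lo, hi = 0, 100000000
--     best, best_tot = 0, 0
--     while lo + 1 < hi:
--         mid = (lo + hi) // 2
--         tot = sum(min(mid, f) for f in lst_food)
--         if tot <= k_:
--             if mid > best:
--                 best, best_tot = mid, tot
--             lo = mid
--         else:
--             hi = mid
--     k_ -= best_tot - 1
--     for idx, f in enumerate(lst_food, 1):
--         if f > best:
--             k_ -= 1
--             if k_ == 0:
--                 return idx
--     return -1
-- ===== Notes on version B (the rewrite author's own statement) =====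
-- stated objective: simpler
-- what changed: Inside the binary search, A computes each tot_ via a sorted copy, a prefix-sum table and bisect_right; B drops all three and computes tot_ = sum(min(mid, f)) by scanning the unsorted list, and the final index scan counts the remaining k down instead of counting matches up.
import Mathlib
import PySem

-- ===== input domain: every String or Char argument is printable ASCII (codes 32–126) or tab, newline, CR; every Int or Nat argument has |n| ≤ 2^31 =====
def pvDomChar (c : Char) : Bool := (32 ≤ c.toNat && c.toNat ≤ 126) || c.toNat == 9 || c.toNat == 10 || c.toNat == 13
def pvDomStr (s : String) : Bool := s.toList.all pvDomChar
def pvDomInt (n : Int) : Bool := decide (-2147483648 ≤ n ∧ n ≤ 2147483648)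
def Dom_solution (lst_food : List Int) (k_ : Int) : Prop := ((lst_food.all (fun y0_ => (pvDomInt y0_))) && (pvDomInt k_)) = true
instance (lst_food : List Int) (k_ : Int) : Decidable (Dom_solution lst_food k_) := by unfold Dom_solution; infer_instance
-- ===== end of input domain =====

-- B replaces A's sort + prefix-sum table + bisect_right inside the binary search by a direct
-- scan sum(min(mid, f)) over the unsorted list, and counts the final index scan down instead of
-- up: simpler (no sort, no auxiliary table, no bisect), same results.

-- ===== PORT A =====
-- A's while-loop over [ptr_s, ptr_e): tot_ from the prefix-sum table sums and bisect_right.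
-- sums[v] is always in range (0 ≤ v ≤ N, sums has N+1 entries), so pyGetD's default is never used.
def pvLoopA (sortedL sums : List Int) (N k ptr_s ptr_e max_ max_tot : Int) : Int × Int :=
  if h : ptr_s + 1 < ptr_e then
    have hlt : ptr_s < PySem.Int.floordiv (ptr_s + ptr_e) 2 ∧
        PySem.Int.floordiv (ptr_s + ptr_e) 2 < ptr_e := by
      rw [PySem.Int.floordiv_eq_ediv_of_pos (by norm_num)]; omega
    let ptr_c := PySem.Int.floordiv (ptr_s + ptr_e) 2
    let v : Nat := PySem.List.bisectRight sortedL ptr_c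
    let tot := PySem.List.pyGetD sums (v : Int) 0 + (N - (v : Int)) * ptr_c
    if tot ≤ k then
      if ptr_c > max_ then pvLoopA sortedL sums N k ptr_c ptr_e ptr_c tot
      else pvLoopA sortedL sums N k ptr_c ptr_e max_ max_tot
    else pvLoopA sortedL sums N k ptr_s ptr_c max_ max_tot
  else (max_, max_tot)
termination_by (ptr_e - ptr_s).toNat
decreasing_by all_goals omega

-- A's final for-loop with idx/cnt_ and break
def pvScanA : List Int → Int → Int → Int → Int → Int
  | [], _, _, _, _ => -1
  | f :: rest, maxv, k, idx, cnt =>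
    if f > maxv then
      if cnt + 1 = k then idx + 1 else pvScanA rest maxv k (idx + 1) (cnt + 1)
    else pvScanA rest maxv k (idx + 1) cnt

def solution (lst_food : List Int) (k_ : Int) : Int :=
  let lst_food_sorted := PySem.List.sorted lst_food (fun x => x) false
  let N : Int := lst_food.length
  let p := lst_food_sorted.foldl (fun (p : Int × List Int) f => (p.1 + f, p.2 ++ [p.1 + f]))
            ((0 : Int), [(0 : Int)])
  let r := pvLoopA lst_food_sorted p.2 N k_ 0 100000000 0 0
  pvScanA lst_food r.1 (k_ - (r.2 - 1)) 0 0

-- ===== PORT B =====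
-- B's while-loop: tot by a direct scan of the unsorted list
def pvLoopB (lst_food : List Int) (k lo hi best best_tot : Int) : Int × Int :=
  if h : lo + 1 < hi then
    have hlt : lo < PySem.Int.floordiv (lo + hi) 2 ∧
        PySem.Int.floordiv (lo + hi) 2 < hi := by
      rw [PySem.Int.floordiv_eq_ediv_of_pos (by norm_num)]; omega
    let mid := PySem.Int.floordiv (lo + hi) 2
    let tot := (lst_food.map (fun f => min mid f)).sum
    if tot ≤ k then
      if mid > best then pvLoopB lst_food k mid hi mid tot
      else pvLoopB lst_food k mid hi best best_tot
    else pvLoopB lst_food k lo mid best best_tot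
  else (best, best_tot)
termination_by (hi - lo).toNat
decreasing_by all_goals omega

-- B's final enumerate loop, counting k down to 0
def pvScanB : List Int → Int → Int → Int → Int
  | [], _, _, _ => -1
  | f :: rest, best, k, idx =>
    if f > best then
      if k - 1 = 0 then idx else pvScanB rest best (k - 1) (idx + 1)
    else pvScanB rest best k (idx + 1)

def solution_alt (lst_food : List Int) (k_ : Int) : Int :=
  let r := pvLoopB lst_food k_ 0 100000000 0 0
  pvScanB lst_food r.1 (k_ - (r.2 - 1)) 1

-- ===== PRECONDITION & SPEC =====
def Spec_solution (lst_food : List Int) (k_ : Int) (out : Int) : Prop := out = solution_alt lst_food k_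
instance (lst_food : List Int) (k_ : Int) (out : Int) : Decidable (Spec_solution lst_food k_ out) := by unfold Spec_solution; infer_instance

-- ===== CLAIM (what is proved, stated in full; the proofs are below) =====
def Claim_equal_solution : Prop := ∀ (lst_food : List Int) (k_ : Int), Dom_solution lst_food k_ → Spec_solution lst_food k_ (solution lst_food k_)

-- ===== LEMMAS AND PROOFS =====

-- prefix sums of l with offset s
def pvPsums : List Int → Int → List Int
  | [], _ => []
  | f :: r, s => (s + f) :: pvPsums r (s + f)

lemma pvFoldl_psums (l : List Int) (s : Int) (acc : List Int) :
    (l.foldl (fun (p : Int × List Int) f => (p.1 + f, p.2 ++ [p.1 + f])) (s, acc)).2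
      = acc ++ pvPsums l s := by
  induction l generalizing s acc with
  | nil => simp [pvPsums]
  | cons f r ih => simp [List.foldl_cons, pvPsums, ih, List.append_assoc]

lemma pvPsums_getD (l : List Int) (s : Int) (j : Nat) (hj : j < l.length) :
    (pvPsums l s).getD j 0 = s + (l.take (j + 1)).sum := by
  induction l generalizing s j with
  | nil => simp at hj
  | cons f r ih =>
    cases j with
    | zero => simp [pvPsums]
    | succ j =>
      simp only [pvPsums, List.getD_cons_succ, List.take_succ_cons, List.sum_cons]
      rw [ih (s + f) j (by simpa using hj)]; ring

lemma pvSums_getD (l : List Int) (v : Nat) (hv : v ≤ l.length) :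
    ((0 : Int) :: pvPsums l 0).getD v 0 = (l.take v).sum := by
  cases v with
  | zero => simp
  | succ v =>
    simp only [List.getD_cons_succ]
    rw [pvPsums_getD l 0 v (by omega)]
    simp

-- sum of min c over a ≤-sorted list, split at a position v that separates ≤ c from > c
lemma pvSplit_sum (l : List Int) (c : Int) (v : Nat) (hv : v ≤ l.length)
    (hle : ∀ j (hj : j < l.length), j < v → l[j] ≤ c)
    (hgt : ∀ j (hj : j < l.length), v ≤ j → c < l[j]) :
    (l.map (fun f => min c f)).sum = (l.take v).sum + ((l.length : Int) - v) * c := by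
  induction l generalizing v with
  | nil => simp at hv ⊢; omega
  | cons f r ih =>
    cases v with
    | zero =>
      have h0 : c < f := hgt 0 (by simp) (by omega)
      have := ih 0 (by omega) (by intro j hj hlt; omega)
        (by intro j hj _; exact hgt (j + 1) (by simpa using hj) (by omega))
      simp only [List.map_cons, List.sum_cons, List.take_zero, List.sum_nil, List.length_cons] at this ⊢
      rw [min_eq_left (le_of_lt h0), this]
      push_cast; ring
    | succ v =>
      have h0 : f ≤ c := hle 0 (by simp) (by omega)
      have := ih v (by simpa using hv)
        (by intro j hj hlt; exact hle (j + 1) (by simpa using hj) (by omega))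
        (by intro j hj hge; exact hgt (j + 1) (by simpa using hj) (by omega))
      simp only [List.map_cons, List.sum_cons, List.take_succ_cons, List.length_cons] at this ⊢
      rw [min_eq_right h0, this]
      push_cast; ring

-- the two tot_ computations agree for every probe value c
lemma pvTot_eq (l : List Int) (c : Int) :
    let sl := PySem.List.sorted l (fun x => x) false
    let v : Nat := PySem.List.bisectRight sl c
    PySem.List.pyGetD ((0 : Int) :: pvPsums sl 0) (v : Int) 0 + ((l.length : Int) - (v : Int)) * c
      = (l.map (fun f => min c f)).sum := by
  intro sl v
  have hperm : sl.Perm l := PySem.List.sorted_perm l (fun x => x) false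
  have hpw : sl.Pairwise (fun a b => a ≤ b) := by
    simpa using PySem.List.sorted_pairwise l (fun x => x)
  obtain ⟨hvle, hle, hgt⟩ := PySem.List.bisectRight_spec sl c hpw
  have hlen : sl.length = l.length := hperm.length_eq
  have hsum : (l.map (fun f => min c f)).sum = (sl.map (fun f => min c f)).sum :=
    ((hperm.map _).sum_eq).symm
  rw [hsum, PySem.List.pyGetD_natCast, pvSums_getD sl v hvle,
      pvSplit_sum sl c v hvle hle hgt, hlen]

-- the two binary-search loops agree
lemma pvLoop_eq (l : List Int) (k : Int) : ∀ (n : Nat) (s e m mt : Int), (e - s).toNat = n →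
    pvLoopA (PySem.List.sorted l (fun x => x) false)
      ((0 : Int) :: pvPsums (PySem.List.sorted l (fun x => x) false) 0)
      (l.length : Int) k s e m mt
      = pvLoopB l k s e m mt := by
  intro n
  induction n using Nat.strong_induction_on with
  | _ n ih =>
    intro s e m mt hn
    rw [pvLoopA, pvLoopB]
    by_cases h : s + 1 < e
    · simp only [h, dite_true]
      have hmid : s < PySem.Int.floordiv (s + e) 2 ∧ PySem.Int.floordiv (s + e) 2 < e := by
        rw [PySem.Int.floordiv_eq_ediv_of_pos (by norm_num)]; omega
      set c := PySem.Int.floordiv (s + e) 2 with hc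
      have htot := pvTot_eq l c
      simp only [] at htot
      rw [htot]
      split_ifs with h1 h2
      · exact ih ((e - c).toNat) (by omega) c e c _ rfl
      · exact ih ((e - c).toNat) (by omega) c e m mt rfl
      · exact ih ((c - s).toNat) (by omega) s c m mt rfl
    · simp [h]

-- the two final scans agree
lemma pvScan_eq (l : List Int) : ∀ (best k idx cnt : Int),
    pvScanA l best k idx cnt = pvScanB l best (k - cnt) (idx + 1) := by
  induction l with
  | nil => intro best k idx cnt; rfl
  | cons f r ih =>
    intro best k idx cnt
    simp only [pvScanA, pvScanB]
    by_cases hf : f > best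
    · simp only [hf, if_true]
      by_cases hk : cnt + 1 = k
      · rw [if_pos hk, if_pos (by omega)]
      · rw [if_neg hk, if_neg (by omega), ih]
        congr 1; ring
    · simp only [hf, if_false, ih]

-- ===== VERDICT (by name: the statement is the Claim_ definition above) =====
theorem solution_spec : Claim_equal_solution := by
  intro lst_food k_ _
  unfold Spec_solution solution solution_alt
  simp only []
  rw [pvFoldl_psums]
  rw [List.singleton_append]
  rw [pvLoop_eq lst_food k_ ((100000000 - 0 : Int)).toNat 0 100000000 0 0 rfl]
  rw [pvScan_eq]
  norm_num
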